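-- pv_equiv track=rewrite | github.com/zzorich/cs61a | lab/lab01/lab01.py | double_eights
-- ===== SOURCE A (Python) =====
-- def double_eights(n):
--     """Return true if n has two eights in a row.
--     >>> double_eights(8)
--     False
--     >>> double_eights(88)
--     True
--     >>> double_eights(2882)
--     True
--     >>> double_eights(880088)
--     True
--     >>> double_eights(12345)
--     False
--     >>> double_eights(80808080)
--     False
--     """
--     "*** YOUR CODE HERE ***"
--     flag = False
--
--     curr_digit, next_digit = 0, 0
--     while n//10 >0:
--         curr_digit, n = n%10, n//10
--         next_digit = n%10
--         if curr_digit == 8 and next_digit == 8: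
--             flag = True
--
--     return flag
-- ===== SOURCE B (Python) =====
-- def double_eights(n):
--     """Return true if n has two eights in a row."""
--     return n >= 10 and (n % 100 == 88 or double_eights(n // 10))
-- ===== Notes on version B (the rewrite author's own statement) =====
-- stated objective: simpler
-- what changed: Replaced the while-loop with a sticky flag and curr/next digit state by a one-line recursion that peels a digit per step and tests the last two digits at once with n % 100 == 88, short-circuiting on the first match.
import Mathlib
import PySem

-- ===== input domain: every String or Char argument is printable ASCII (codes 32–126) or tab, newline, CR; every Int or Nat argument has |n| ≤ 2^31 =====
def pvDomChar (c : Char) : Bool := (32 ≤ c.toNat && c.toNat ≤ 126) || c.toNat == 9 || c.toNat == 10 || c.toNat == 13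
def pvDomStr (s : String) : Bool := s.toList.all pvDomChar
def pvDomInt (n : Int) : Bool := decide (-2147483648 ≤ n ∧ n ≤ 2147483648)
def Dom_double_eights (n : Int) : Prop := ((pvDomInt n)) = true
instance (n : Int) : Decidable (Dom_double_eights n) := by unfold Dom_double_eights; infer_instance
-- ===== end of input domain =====

-- B replaces A's while-loop with a sticky flag and digit state by a one-line
-- short-circuiting recursion testing the last two digits with n % 100 == 88 (objective: simpler).

-- ===== PORT A =====
-- the while loop of A: state is (n, flag); curr/next are recomputed each iteration
def pvALoop (n : Int) (flag : Bool) : Bool :=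
  if _h : PySem.Int.floordiv n 10 > 0 then
    let curr := PySem.Int.mod n 10
    let n' := PySem.Int.floordiv n 10
    let next := PySem.Int.mod n' 10
    pvALoop n' (if curr = 8 ∧ next = 8 then true else flag)
  else flag
termination_by n.toNat
decreasing_by
  rw [PySem.Int.floordiv_eq_ediv_of_pos (by norm_num)] at *
  omega

def double_eights (n : Int) : Bool := pvALoop n false

-- ===== PORT B =====
def double_eights_alt (n : Int) : Bool :=
  if _h : n ≥ 10 then
    (PySem.Int.mod n 100 == 88) || double_eights_alt (PySem.Int.floordiv n 10)
  else false
termination_by n.toNat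
decreasing_by
  rw [PySem.Int.floordiv_eq_ediv_of_pos (by norm_num)]
  omega

-- ===== PRECONDITION & SPEC =====
def Spec_double_eights (n : Int) (out : Bool) : Prop := out = double_eights_alt n
instance (n : Int) (out : Bool) : Decidable (Spec_double_eights n out) := by unfold Spec_double_eights; infer_instance

-- ===== CLAIM (what is proved, stated in full; the proofs are below) =====
def Claim_equal_double_eights : Prop := ∀ (n : Int), Dom_double_eights n → Spec_double_eights n (double_eights n)

-- ===== LEMMAS AND PROOFS =====
lemma mod100_split (n : Int) : (n % 10 = 8 ∧ n / 10 % 10 = 8) ↔ n % 100 = 88 := by omega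

lemma pvALoop_eq_alt_aux (k : Nat) : ∀ (n : Int), n.toNat ≤ k → ∀ (flag : Bool),
    pvALoop n flag = (flag || double_eights_alt n) := by
  induction k with
  | zero =>
    intro n hk flag
    rw [pvALoop, double_eights_alt]
    have hn : ¬ n ≥ 10 := by omega
    have hnpos : ¬ PySem.Int.floordiv n 10 > 0 := by
      rw [PySem.Int.floordiv_eq_ediv_of_pos (by norm_num)]; omega
    rw [dif_neg hnpos, dif_neg hn]; simp
  | succ k ih' =>
  intro n hk flag
  rw [pvALoop, double_eights_alt]
  by_cases hn : n ≥ 10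
  · have hpos : PySem.Int.floordiv n 10 > 0 := by
      rw [PySem.Int.floordiv_eq_ediv_of_pos (by norm_num)]; omega
    rw [dif_pos hpos, dif_pos hn]
    rw [ih' _ (by rw [PySem.Int.floordiv_eq_ediv_of_pos (by norm_num)]; omega)]
    have hd : PySem.Int.floordiv n 10 = n / 10 := PySem.Int.floordiv_eq_ediv_of_pos (by norm_num)
    have hm10 : PySem.Int.mod n 10 = n % 10 := PySem.Int.mod_eq_emod_of_pos (by norm_num)
    have hm10' : PySem.Int.mod (PySem.Int.floordiv n 10) 10 = n / 10 % 10 := by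
      rw [hd]; exact PySem.Int.mod_eq_emod_of_pos (by norm_num)
    have hm100 : PySem.Int.mod n 100 = n % 100 := PySem.Int.mod_eq_emod_of_pos (by norm_num)
    rw [hm10', hm10, hm100, hd]
    by_cases hp : n % 10 = 8 ∧ n / 10 % 10 = 8
    · simp [hp, (mod100_split n).mp hp]
    · have h88 : (n % 100 == 88) = false := by
        simpa using fun h => hp ((mod100_split n).mpr h)
      simp [hp, h88]
  · have hnpos : ¬ PySem.Int.floordiv n 10 > 0 := by
      rw [PySem.Int.floordiv_eq_ediv_of_pos (by norm_num)]; omega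
    rw [dif_neg hnpos, dif_neg hn]
    simp

-- ===== VERDICT (by name: the statement is the Claim_ definition above) =====
theorem double_eights_spec : Claim_equal_double_eights := by
  intro n _
  unfold Spec_double_eights double_eights
  simpa using pvALoop_eq_alt_aux n.toNat n le_rfl false
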